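-- pv_equiv track=rewrite | github.com/ahm1844/citespine | src/analysis/overview.py | _find_highlights
-- ===== SOURCE A (Python) =====
-- from typing import Dict, List, Any, Optional
--
-- def _find_highlights(text: str, terms: List[str]) -> List[Dict[str, int]]:
--     """Find highlight positions for terms in text."""
--     highlights = []
--     text_lower = text.lower()
--
--     for term in terms:
--         term_lower = term.lower()
--         start = 0
--         while True:
--             pos = text_lower.find(term_lower, start)
--             if pos == -1:
--                 break
--             highlights.append({"start": pos, "end": pos + len(term)})
--             start = pos + 1
--
--     # Sort by start position and merge overlapping highlights
--     highlights.sort(key=lambda x: x["start"])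
--     merged = []
--     for h in highlights:
--         if merged and h["start"] <= merged[-1]["end"]:
--             merged[-1]["end"] = max(merged[-1]["end"], h["end"])
--         else:
--             merged.append(h)
--
--     return merged
-- ===== SOURCE B (Python) =====
-- from typing import Dict, List
--
-- def _find_highlights(text: str, terms: List[str]) -> List[Dict[str, int]]:
--     """Single left-to-right sweep over all positions, merging on the fly (no sort)."""
--     text_lower = text.lower()
--     n = len(text)
--     lowered = [t.lower() for t in terms]
--     merged = []
--     for i in range(n + 1):
--         for term, tl in zip(terms, lowered):
--             if text_lower[i:i + len(tl)] == tl: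
--                 h = {"start": i, "end": i + len(term)}
--                 if merged and h["start"] <= merged[-1]["end"]:
--                     merged[-1]["end"] = max(merged[-1]["end"], h["end"])
--                 else:
--                     merged.append(h)
--     return merged
-- ===== Notes on version B (the rewrite author's own statement) =====
-- stated objective: alternative
-- what changed: A repeatedly calls str.find per term and then sorts and merges all hit intervals; B makes one left-to-right sweep over the positions of the text, testing each term by slice comparison at each position, so the hits arrive already in order and are merged on the fly with no sort and no find loop.
import Mathlib
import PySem

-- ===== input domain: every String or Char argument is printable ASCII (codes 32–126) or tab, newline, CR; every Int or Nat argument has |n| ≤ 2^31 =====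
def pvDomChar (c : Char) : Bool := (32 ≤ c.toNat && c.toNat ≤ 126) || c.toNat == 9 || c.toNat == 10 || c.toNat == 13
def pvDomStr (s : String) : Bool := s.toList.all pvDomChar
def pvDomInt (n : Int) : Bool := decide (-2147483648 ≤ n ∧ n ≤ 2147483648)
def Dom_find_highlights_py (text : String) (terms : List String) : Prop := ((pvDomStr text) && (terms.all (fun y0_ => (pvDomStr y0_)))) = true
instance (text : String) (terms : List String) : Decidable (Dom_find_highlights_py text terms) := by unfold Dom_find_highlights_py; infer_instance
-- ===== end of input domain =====

-- B replaces A's per-term find-loop plus sort by a single left-to-right positional sweep that merges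
-- highlights on the fly (no sort); same return value.

-- shared helper: the dict literal {"start": s, "end": e} (both Pythons build exactly this two-entry dict)
def pvHl (s e : Int) : PySem.Dict String Int := ⟨[("start", s), ("end", e)]⟩

-- shared helper: one step of the merge (identical inline code in both Pythons);
-- h["start"] / h["end"] are ported with getD — both keys are always present in these two-entry dicts.
def pvMergeStep (merged : List (PySem.Dict String Int)) (h : PySem.Dict String Int) : List (PySem.Dict String Int) :=
  match merged.getLast? with
  | some last =>
    if PySem.Dict.getD h "start" (0:Int) ≤ PySem.Dict.getD last "end" (0:Int) then
      merged.dropLast ++ [PySem.Dict.insert last "end" (max (PySem.Dict.getD last "end" (0:Int)) (PySem.Dict.getD h "end" (0:Int)))]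
    else merged ++ [h]
  | none => merged ++ [h]

-- ===== PORT A =====
-- A's inner 'while True' find loop; fuel is only a termination device (tl.length + 2 always suffices:
-- every found position is ≥ start, start strictly increases, and find from start > len(text) is -1).
def pvWhileA (tl tlow : List Char) (tLen : Nat) (acc : List (PySem.Dict String Int)) (start : Nat) : Nat → List (PySem.Dict String Int)
  | 0 => acc
  | fuel + 1 =>
    let pos := PySem.Chars.findFrom tl tlow (start : Int) none
    if pos = -1 then acc
    else pvWhileA tl tlow tLen (acc ++ [pvHl pos (pos + (tLen : Int))]) (pos.toNat + 1) fuel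

def find_highlights_py (text : String) (terms : List String) : List (List (String × Int)) :=
  let tl := PySem.Chars.lower text.toList
  let highlights := terms.foldl (fun acc term =>
    pvWhileA tl (PySem.Chars.lower term.toList) term.toList.length acc 0 (tl.length + 2)) []
  let sortedH := PySem.List.sorted highlights (fun h => PySem.Dict.getD h "start" (0:Int)) false
  (sortedH.foldl pvMergeStep []).map (fun d => d.items)

-- ===== PORT B =====
def find_highlights_py_alt (text : String) (terms : List String) : List (List (String × Int)) :=
  let tl := PySem.Chars.lower text.toList
  let lowered := terms.map (fun t => PySem.Chars.lower t.toList)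
  (List.range (text.toList.length + 1)).foldl (fun merged (i : Nat) =>
    (terms.zip lowered).foldl (fun merged tp =>
      if PySem.Chars.slice tl (some (i : Int)) (some ((i : Int) + (tp.2.length : Int))) = tp.2 then
        pvMergeStep merged (pvHl (i : Int) ((i : Int) + (tp.1.toList.length : Int)))
      else merged) merged) [] |>.map (fun d => d.items)

-- ===== PRECONDITION & SPEC =====
def Spec_find_highlights_py (text : String) (terms : List String) (out : List (List (String × Int))) : Prop := out = find_highlights_py_alt text terms
instance (text : String) (terms : List String) (out : List (List (String × Int))) : Decidable (Spec_find_highlights_py text terms out) := by unfold Spec_find_highlights_py; infer_instance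

-- ===== CLAIM (what is proved, stated in full; the proofs are below) =====
def Claim_equal_find_highlights_py : Prop := ∀ (text : String) (terms : List String), Dom_find_highlights_py text terms → Spec_find_highlights_py text terms (find_highlights_py text terms)

-- ===== LEMMAS AND PROOFS =====

def pvMatch (tl : List Char) (t : String) (i : Nat) : Bool := (PySem.Chars.lower t.toList).isPrefixOf (tl.drop i)
def pvBlock (tl : List Char) (ts : List String) (i : Nat) : List (PySem.Dict String Int) :=
  (ts.filter (fun t => pvMatch tl t i)).map (fun t => pvHl (i : Int) ((i : Int) + (t.toList.length : Int)))

theorem pvMem_block_key (tl : List Char) (ts : List String) (i : Nat) (y : PySem.Dict String Int)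
    (h : y ∈ pvBlock tl ts i) : PySem.Dict.getD y "start" (0:Int) = (i : Int) := by
  simp only [pvBlock, List.mem_map, List.mem_filter] at h
  obtain ⟨t, _, rfl⟩ := h
  rfl

theorem pvFindFrom_gt (s sub : List Char) (start : Int) (h : (s.length : Int) < start) :
    PySem.Chars.findFrom s sub start none = -1 := by
  simp only [PySem.Chars.findFrom]
  split_ifs with h1 h2 h3 h4 <;> omega

theorem pvInsertBy_middle {α : Type} (before : α → α → Bool) (x b : α) (A B : List α)
    (hA : ∀ y ∈ A, before x y = false) (hb : before x b = true) :
    PySem.List.insertBy before x (A ++ b :: B) = A ++ x :: b :: B := by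
  induction A with
  | nil => simp [PySem.List.insertBy, hb]
  | cons a A ih =>
    have : before x a = false := hA a (by simp)
    simp [PySem.List.insertBy, this, ih (fun y hy => hA y (by simp [hy]))]

def pvInterleave (tl : List Char) (ts : List String) : List (PySem.Dict String Int) :=
  (List.range (tl.length + 1)).flatMap (pvBlock tl ts)
def pvMixed (tl : List Char) (ts : List String) (t : String) (j : Nat) : List (PySem.Dict String Int) :=
  (List.range (tl.length + 1)).flatMap (fun i => if i < j then pvBlock tl (ts ++ [t]) i else pvBlock tl ts i)

theorem pvBlock_append_not (tl : List Char) (ts : List String) (t : String) (i : Nat)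
    (h : pvMatch tl t i = false) : pvBlock tl (ts ++ [t]) i = pvBlock tl ts i := by
  simp [pvBlock, List.filter_append, h]

theorem pvBlock_append_match (tl : List Char) (ts : List String) (t : String) (i : Nat)
    (h : pvMatch tl t i = true) :
    pvBlock tl (ts ++ [t]) i = pvBlock tl ts i ++ [pvHl (i : Int) ((i : Int) + (t.toList.length : Int))] := by
  simp [pvBlock, List.filter_append, h]

theorem pvMixed_zero (tl : List Char) (ts : List String) (t : String) :
    pvMixed tl ts t 0 = pvInterleave tl ts := by
  simp [pvMixed, pvInterleave]

theorem pvMixed_top (tl : List Char) (ts : List String) (t : String) :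
    pvMixed tl ts t (tl.length + 1) = pvInterleave tl (ts ++ [t]) := by
  unfold pvMixed pvInterleave
  apply List.flatMap_congr   -- guess; may not exist
  intro i hi
  simp [List.mem_range] at hi
  simp [hi]

theorem pvMixed_succ_of_not (tl : List Char) (ts : List String) (t : String) (j : Nat)
    (h : pvMatch tl t j = false) : pvMixed tl ts t j = pvMixed tl ts t (j + 1) := by
  unfold pvMixed
  apply List.flatMap_congr
  intro i _
  rcases Nat.lt_trichotomy i j with hij | rfl | hij
  · simp [hij, Nat.lt_succ_of_lt hij]
  · simp [pvBlock_append_not tl ts t i h]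
  · simp [Nat.lt_asymm hij, Nat.not_lt.mpr (Nat.succ_le_of_lt hij)]

def pvBef (x y : PySem.Dict String Int) : Bool :=
  decide (PySem.Dict.getD x "start" (0:Int) < PySem.Dict.getD y "start" (0:Int))

theorem pvKey_hl (s e : Int) : PySem.Dict.getD (pvHl s e) "start" (0:Int) = s := rfl

theorem pvInsert_into_mixed (tl : List Char) (ts : List String) (t : String) (i j : Nat)
    (hji : j ≤ i) (hin : i ≤ tl.length) (hm : pvMatch tl t i = true)
    (hmin : ∀ i', j ≤ i' → i' < i → pvMatch tl t i' = false) :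
    PySem.List.insertBy pvBef (pvHl (i : Int) ((i : Int) + (t.toList.length : Int))) (pvMixed tl ts t j)
      = pvMixed tl ts t (i + 1) := by
  set x := pvHl (i : Int) ((i : Int) + (t.toList.length : Int)) with hx
  set n := tl.length with hn
  have hsplit : List.range (n + 1) = List.range' 0 (i + 1) ++ List.range' (i + 1) (n - i) := by
    rw [List.range_eq_range']
    have h1 : n + 1 = (i + 1) + (n - i) := by omega
    rw [h1, ← List.range'_append]
    simp
  -- key of any element of a block at position i'
  have hkey : ∀ (j' i' : Nat) (y : PySem.Dict String Int),
      y ∈ (if i' < j' then pvBlock tl (ts ++ [t]) i' else pvBlock tl ts i') →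
      PySem.Dict.getD y "start" (0:Int) = (i' : Int) := by
    intro j' i' y hy
    by_cases h : i' < j' <;> simp [h] at hy <;> exact pvMem_block_key _ _ _ _ hy
  have hP : ∀ y ∈ (List.range' 0 (i + 1)).flatMap
      (fun i' => if i' < j then pvBlock tl (ts ++ [t]) i' else pvBlock tl ts i'), pvBef x y = false := by
    intro y hy
    rw [List.mem_flatMap] at hy
    obtain ⟨i', hi', hyi'⟩ := hy
    have hlt : i' < i + 1 := by
      have := List.mem_range'_1.mp hi'; omega
    have hk := hkey j i' y hyi'
    simp [pvBef, hx, pvKey_hl, hk]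
    omega
  have hS : ∀ y ∈ (List.range' (i + 1) (n - i)).flatMap
      (fun i' => if i' < j then pvBlock tl (ts ++ [t]) i' else pvBlock tl ts i'), pvBef x y = true := by
    intro y hy
    rw [List.mem_flatMap] at hy
    obtain ⟨i', hi', hyi'⟩ := hy
    have hlt : i + 1 ≤ i' := by
      have := List.mem_range'_1.mp hi'; omega
    have hk := hkey j i' y hyi'
    simp [pvBef, hx, pvKey_hl, hk]
    omega
  have hmain : PySem.List.insertBy pvBef x (pvMixed tl ts t j) =
      (List.range' 0 (i + 1)).flatMap (fun i' => if i' < j then pvBlock tl (ts ++ [t]) i' else pvBlock tl ts i')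
      ++ [x]
      ++ (List.range' (i + 1) (n - i)).flatMap (fun i' => if i' < j then pvBlock tl (ts ++ [t]) i' else pvBlock tl ts i') := by
    unfold pvMixed
    rw [← hn, hsplit, List.flatMap_append]
    cases hScase : (List.range' (i + 1) (n - i)).flatMap
        (fun i' => if i' < j then pvBlock tl (ts ++ [t]) i' else pvBlock tl ts i') with
    | nil => simp [PySem.List.insertBy_of_forall_not_before _ _ _ hP]
    | cons b B =>
      have hb : pvBef x b = true := hS b (by rw [hScase]; simp)
      rw [pvInsertBy_middle pvBef x b _ B hP hb]
      simp
  rw [hmain]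
  -- now show RHS = pvMixed tl ts t (i+1)
  unfold pvMixed
  rw [← hn, hsplit, List.flatMap_append]
  congr 1
  · -- prefix blocks ++ [x] = flatMap over range' 0 (i+1) with boundary i+1
    have h2 : List.range' 0 (i + 1) = List.range' 0 i ++ [i] := by
      have h1 : i + 1 = i + 1 := rfl
      rw [← List.range'_append (s := 0) (m := i) (n := 1) (step := 1)]
      simp
    rw [h2, List.flatMap_append, List.flatMap_append]
    simp only [List.flatMap_cons, List.flatMap_nil, List.append_nil]
    have hfi : (if i < j then pvBlock tl (ts ++ [t]) i else pvBlock tl ts i) = pvBlock tl ts i := by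
      simp [Nat.not_lt.mpr hji]
    have hfi' : (if i < i + 1 then pvBlock tl (ts ++ [t]) i else pvBlock tl ts i)
        = pvBlock tl ts i ++ [x] := by
      simp [pvBlock_append_match tl ts t i hm, hx]
    rw [hfi, hfi']
    rw [List.append_assoc]
    congr 1
    apply List.flatMap_congr
    intro i' hi'
    have hlt : i' < i := by have := List.mem_range'_1.mp hi'; omega
    by_cases hij : i' < j
    · simp [hij, Nat.lt_succ_of_lt hlt]
    · have : pvMatch tl t i' = false := hmin i' (by omega) hlt
      simp [hij, Nat.lt_succ_of_lt hlt, pvBlock_append_not tl ts t i' this]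
  · apply List.flatMap_congr
    intro i' hi'
    have hlt : i + 1 ≤ i' := by have := List.mem_range'_1.mp hi'; omega
    simp [Nat.not_lt.mpr (by omega : j ≤ i'), Nat.not_lt.mpr hlt]

theorem pvFold_positions (tl : List Char) (ts : List String) (t : String) :
    ∀ m j, j + m = tl.length + 1 →
    List.foldl (fun acc x => PySem.List.insertBy pvBef x acc) (pvMixed tl ts t j)
      (((List.range' j m).filter (fun i => pvMatch tl t i)).map
        (fun i : Nat => pvHl (i : Int) ((i : Int) + (t.toList.length : Int))))
      = pvMixed tl ts t (tl.length + 1) := by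
  intro m
  induction m with
  | zero => intro j hj; simp; rw [show j = tl.length + 1 by omega]
  | succ m ih =>
    intro j hj
    rw [List.range'_succ]
    by_cases hm : pvMatch tl t j = true
    · simp only [List.filter_cons, hm, if_true, List.map_cons, List.foldl_cons]
      rw [pvInsert_into_mixed tl ts t j j (le_refl j) (by omega) hm (by omega)]
      exact ih (j + 1) (by omega)
    · have hm' : pvMatch tl t j = false := by simp_all
      simp only [List.filter_cons, hm', Bool.false_eq_true, if_false]
      rw [pvMixed_succ_of_not tl ts t j hm']
      exact ih (j + 1) (by omega)

theorem pvSorted_raw (tl : List Char) :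
    ∀ ts : List String,
    List.foldl (fun acc x => PySem.List.insertBy pvBef x acc) []
      (ts.flatMap (fun t => ((List.range (tl.length + 1)).filter (fun i => pvMatch tl t i)).map
        (fun i : Nat => pvHl (i : Int) ((i : Int) + (t.toList.length : Int)))))
      = pvInterleave tl ts := by
  intro ts
  induction ts using List.reverseRecOn with
  | nil => simp [pvInterleave, pvBlock]
  | append_singleton ts t ih =>
    rw [List.flatMap_append, List.foldl_append, ih, List.flatMap_singleton]
    rw [← pvMixed_zero tl ts t, List.range_eq_range']
    rw [pvFold_positions tl ts t (tl.length + 1) 0 (by omega)]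
    exact pvMixed_top tl ts t

theorem pvInfix_of_prefix_drop (tl tlow : List Char) (k i : Nat) (hk : k ≤ i)
    (h : tlow <+: tl.drop i) : tlow <:+: tl.drop k := by
  have hd : tl.drop i = (tl.drop k).drop (i - k) := by
    rw [List.drop_drop]; congr 1; omega
  rw [hd] at h
  exact h.isInfix.trans (List.drop_suffix _ _).isInfix

theorem pvWhileA_spec (tl tlow : List Char) (tLen : Nat) :
    ∀ fuel start acc, start ≤ tl.length + 1 → tl.length + 2 ≤ fuel + start →
    pvWhileA tl tlow tLen acc start fuel =
      acc ++ ((List.range' start (tl.length + 1 - start)).filter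
        (fun i => tlow.isPrefixOf (tl.drop i))).map
        (fun i : Nat => pvHl (i : Int) ((i : Int) + (tLen : Int))) := by
  intro fuel
  induction fuel with
  | zero => intro start acc h1 h2; omega
  | succ fuel ih =>
    intro start acc h1 h2
    by_cases hs : start = tl.length + 1
    · subst hs
      have hneg : PySem.Chars.findFrom tl tlow ((tl.length : Int) + 1) none = -1 :=
        pvFindFrom_gt tl tlow _ (by omega)
      simp [pvWhileA, hneg]
    · have hle : start ≤ tl.length := by omega
      by_cases hpos : PySem.Chars.findFrom tl tlow (start : Int) none = -1
      · have hni : ¬ tlow <:+: tl.drop start :=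
          (PySem.Chars.findFrom_natCast_eq_neg_one_iff tl tlow start hle).mp hpos
        have hfil : (List.range' start (tl.length + 1 - start)).filter
            (fun i => tlow.isPrefixOf (tl.drop i)) = [] := by
          rw [List.filter_eq_nil_iff]
          intro i hi
          simp only [List.isPrefixOf_iff_prefix, Bool.not_eq_true]
          intro hpref
          exact hni (pvInfix_of_prefix_drop tl tlow start i (List.mem_range'_1.mp hi).1 hpref)
        simp [pvWhileA, hpos, hfil]
      · have spec := PySem.Chars.findFrom_natCast_spec tl tlow start hle hpos
        obtain ⟨hge, hpref, hmin⟩ := spec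
        set pos := PySem.Chars.findFrom tl tlow (start : Int) none with hposdef
        set p := pos.toNat with hp
        have hposnn : 0 ≤ pos := le_trans (by exact_mod_cast Nat.zero_le start) hge
        have hcast : pos = (p : Int) := (Int.toNat_of_nonneg hposnn).symm
        have hstartp : start ≤ p := by omega
        have hpn : p ≤ tl.length := by
          by_cases ht : tlow = []
          · subst ht
            by_contra hgt
            exact hmin start (le_refl _) (by omega) (List.nil_prefix)
          · have := hpref.length_le
            rw [List.length_drop] at this
            have : 1 ≤ tlow.length := Nat.one_le_iff_ne_zero.mpr (by simpa using ht)
            have := hpref.length_le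
            rw [List.length_drop] at this
            omega
        -- decompose the range
        have hrange : List.range' start (tl.length + 1 - start) =
            List.range' start (p - start) ++ (p :: List.range' (p + 1) (tl.length - p)) := by
          have e1 : p :: List.range' (p + 1) (tl.length - p) = List.range' p (tl.length + 1 - p) := by
            rw [show tl.length + 1 - p = (tl.length - p) + 1 from by omega, List.range'_succ]
          have e := List.range'_append (s := start) (m := p - start) (n := tl.length + 1 - p) (step := 1)
          rw [show start + 1 * (p - start) = p from by omega] at e
          rw [e1, e, show p - start + (tl.length + 1 - p) = tl.length + 1 - start from by omega]
        have hfil1 : (List.range' start (p - start)).filter (fun i => tlow.isPrefixOf (tl.drop i)) = [] := by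
          rw [List.filter_eq_nil_iff]
          intro i hi
          have := List.mem_range'_1.mp hi
          simp only [List.isPrefixOf_iff_prefix, Bool.not_eq_true]
          intro hc
          exact hmin i this.1 (by omega) hc
        have hstep : pvWhileA tl tlow tLen acc start (fuel + 1) =
            pvWhileA tl tlow tLen (acc ++ [pvHl pos (pos + (tLen : Int))]) (p + 1) fuel := by
          simp only [pvWhileA]
          rw [← hposdef]
          simp [hpos]
          rw [← hp]
        rw [hstep, ih (p + 1) _ (by omega) (by omega)]
        rw [hrange, List.filter_append, hfil1, List.nil_append, List.filter_cons,
          (by simpa [List.isPrefixOf_iff_prefix] using hpref : tlow.isPrefixOf (tl.drop p) = true)]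
        simp [hcast]

def pvGA (tl : List Char) (t : String) : List (PySem.Dict String Int) :=
  ((List.range (tl.length + 1)).filter (fun i => pvMatch tl t i)).map
    (fun i : Nat => pvHl (i : Int) ((i : Int) + (t.toList.length : Int)))

theorem pvSorted_raw' (tl : List Char) (ts : List String) :
    List.foldl (fun acc x => PySem.List.insertBy pvBef x acc) [] (ts.flatMap (pvGA tl))
      = pvInterleave tl ts := by
  have h : ts.flatMap (pvGA tl) = ts.flatMap (fun t =>
      ((List.range (tl.length + 1)).filter (fun i => pvMatch tl t i)).map
        (fun i : Nat => pvHl (i : Int) ((i : Int) + (t.toList.length : Int)))) := rfl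
  rw [h]
  exact pvSorted_raw tl ts

theorem pvA_eq (text : String) (terms : List String) :
    find_highlights_py text terms =
      ((pvInterleave (PySem.Chars.lower text.toList) terms).foldl pvMergeStep []).map (fun d => d.items) := by
  simp only [find_highlights_py]
  set tl := PySem.Chars.lower text.toList with htl
  congr 1
  have h1 : ∀ (acc : List (PySem.Dict String Int)), ∀ t ∈ terms,
      pvWhileA tl (PySem.Chars.lower t.toList) t.toList.length acc 0 (tl.length + 2) =
      acc ++ pvGA tl t := by
    intro acc t _
    rw [pvWhileA_spec tl (PySem.Chars.lower t.toList) t.toList.length (tl.length + 2) 0 acc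
      (by omega) (by omega)]
    rw [Nat.sub_zero, ← List.range_eq_range']
    rfl
  have h2 := PySem.List.foldl_congr_mem terms _ (fun acc t => acc ++ pvGA tl t) [] h1
  rw [h2, PySem.List.foldl_append_eq_flatMap, List.nil_append]
  rw [PySem.List.sorted_eq_foldl_insertBy]
  have hbef : (fun (a b : PySem.Dict String Int) =>
      decide (PySem.Dict.getD a "start" (0:Int) < PySem.Dict.getD b "start" (0:Int))) = pvBef := rfl
  rw [hbef]
  rw [pvSorted_raw' tl terms]

theorem pvB_core (tl : List Char) (terms : List String) :
    (List.range (tl.length + 1)).foldl (fun merged (i : Nat) =>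
      (terms.zip (terms.map (fun t => PySem.Chars.lower t.toList))).foldl (fun merged tp =>
        if PySem.Chars.slice tl (some (i : Int)) (some ((i : Int) + (tp.2.length : Int))) = tp.2 then
          pvMergeStep merged (pvHl (i : Int) ((i : Int) + (tp.1.toList.length : Int)))
        else merged) merged) []
    = (pvInterleave tl terms).foldl pvMergeStep [] := by
  have hzip : terms.zip (terms.map (fun t => PySem.Chars.lower t.toList)) =
      terms.map (fun t => (t, PySem.Chars.lower t.toList)) := by
    induction terms with
    | nil => rfl
    | cons a l ih => simpa using ih
  have houter : ∀ (merged : List (PySem.Dict String Int)), ∀ i ∈ List.range (tl.length + 1),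
      (terms.zip (terms.map (fun t => PySem.Chars.lower t.toList))).foldl (fun merged tp =>
        if PySem.Chars.slice tl (some (i : Int)) (some ((i : Int) + (tp.2.length : Int))) = tp.2 then
          pvMergeStep merged (pvHl (i : Int) ((i : Int) + (tp.1.toList.length : Int)))
        else merged) merged
      = List.foldl pvMergeStep merged (pvBlock tl terms i) := by
    intro merged i _
    rw [hzip, List.foldl_map]
    simp only []
    have hstep : ∀ (acc : List (PySem.Dict String Int)), ∀ t ∈ terms,
        (if PySem.Chars.slice tl (some (i : Int)) (some ((i : Int) + (((PySem.Chars.lower t.toList)).length : Int))) = PySem.Chars.lower t.toList then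
          pvMergeStep acc (pvHl (i : Int) ((i : Int) + (t.toList.length : Int)))
        else acc)
        = (if pvMatch tl t i then pvMergeStep acc (pvHl (i : Int) ((i : Int) + (t.toList.length : Int))) else acc) := by
      intro acc t _
      have hcond : (PySem.Chars.slice tl (some (i : Int)) (some ((i : Int) + (((PySem.Chars.lower t.toList)).length : Int))) = PySem.Chars.lower t.toList)
          ↔ pvMatch tl t i = true := by
        rw [PySem.Chars.slice_eq_listSlice, PySem.List.slice_natCast_add]
        unfold pvMatch
        rw [List.isPrefixOf_iff_prefix, List.prefix_iff_eq_take, eq_comm]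
      by_cases h : pvMatch tl t i = true
      · rw [if_pos (hcond.mpr h), h, if_pos rfl]
      · rw [if_neg (fun hc => h (hcond.mp hc)), if_neg (by simpa using h)]
    rw [PySem.List.foldl_congr_mem terms _ _ merged hstep]
    rw [PySem.List.foldl_if_eq_foldl_filter]
    rw [pvBlock, List.foldl_map]
  rw [PySem.List.foldl_congr_mem _ _ _ [] houter]
  rw [pvInterleave, List.flatMap_def, List.foldl_flatten, List.foldl_map]

theorem pvB_eq (text : String) (terms : List String) :
    find_highlights_py_alt text terms =
      ((pvInterleave (PySem.Chars.lower text.toList) terms).foldl pvMergeStep []).map (fun d => d.items) := by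
  simp only [find_highlights_py_alt]
  congr 1
  have hlen : text.toList.length = (PySem.Chars.lower text.toList).length := by
    simp [PySem.Chars.lower]
  rw [hlen]
  exact pvB_core (PySem.Chars.lower text.toList) terms

-- ===== VERDICT (by name: the statement is the Claim_ definition above) =====
theorem find_highlights_py_spec : Claim_equal_find_highlights_py := by
  intro text terms _
  unfold Spec_find_highlights_py
  rw [pvA_eq, pvB_eq]
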